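-- pv_equiv track=rewrite | github.com/Ahjan108/phoenix_omega_v4.8 | scripts/validate_book_001_readiness.py | validate_emotional_curve
-- ===== SOURCE A (Python) =====
-- def validate_emotional_curve(
--     dominant_band_sequence: list[int | None],
--     chapter_count: int,
-- ) -> list[str]:
--     """
--     Enforce emotional curve when chapter_count >= 6:
--     1. >= 3 distinct BAND values
--     2. No more than 3 consecutive chapters with same BAND
--     """
--     errors: list[str] = []
--     if chapter_count < 6:
--         return errors
--
--     # Use only non-None bands for diversity; sequence may contain None for chapters without STORY
--     bands_in_sequence = [b for b in dominant_band_sequence if b is not None]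
--
--     # Rule 1: minimum diversity
--     distinct_bands = set(bands_in_sequence)
--     if len(distinct_bands) < 3:
--         errors.append(
--             f"Emotional curve invalid: only {len(distinct_bands)} distinct BAND values found "
--             f"(minimum 3 required for books >= 6 chapters)."
--         )
--
--     # Rule 2: no more than 3 consecutive same band
--     max_run = 1
--     current_run = 1
--     for i in range(1, len(dominant_band_sequence)):
--         curr = dominant_band_sequence[i]
--         prev = dominant_band_sequence[i - 1]
--         if curr is not None and prev is not None and curr == prev:
--             current_run += 1
--             max_run = max(max_run, current_run)
--         else:
--             current_run = 1
--
--     if max_run > 3: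
--         errors.append(
--             f"Emotional curve invalid: {max_run} consecutive chapters "
--             f"with same BAND detected (maximum allowed is 3)."
--         )
--
--     return errors
-- ===== SOURCE B (Python) =====
-- def _runs(seq):
--     """Yield (value, run_length) for each maximal run of equal adjacent elements."""
--     i, n = 0, len(seq)
--     while i < n:
--         j = i
--         while j < n and seq[j] == seq[i]:
--             j += 1
--         yield seq[i], j - i
--         i = j
--
--
-- def validate_emotional_curve(
--     dominant_band_sequence: list,
--     chapter_count: int,
-- ) -> list:
--     errors = []
--     if chapter_count < 6:
--         return errors
--
--     distinct_bands = {b for b in dominant_band_sequence if b is not None}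
--     if len(distinct_bands) < 3:
--         errors.append(
--             f"Emotional curve invalid: only {len(distinct_bands)} distinct BAND values found "
--             f"(minimum 3 required for books >= 6 chapters)."
--         )
--
--     max_run = max(
--         (length for band, length in _runs(dominant_band_sequence) if band is not None),
--         default=1,
--     )
--     if max_run > 3:
--         errors.append(
--             f"Emotional curve invalid: {max_run} consecutive chapters "
--             f"with same BAND detected (maximum allowed is 3)."
--         )
--
--     return errors
-- ===== Notes on version B (the rewrite author's own statement) =====
-- stated objective: alternative
-- what changed: Rule 2's incremental prev/curr run-counter loop is replaced by a run-length-encoding pass (group the sequence into maximal runs of equal adjacent values) followed by a max over the lengths of non-None runs with default 1.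
import Mathlib
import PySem

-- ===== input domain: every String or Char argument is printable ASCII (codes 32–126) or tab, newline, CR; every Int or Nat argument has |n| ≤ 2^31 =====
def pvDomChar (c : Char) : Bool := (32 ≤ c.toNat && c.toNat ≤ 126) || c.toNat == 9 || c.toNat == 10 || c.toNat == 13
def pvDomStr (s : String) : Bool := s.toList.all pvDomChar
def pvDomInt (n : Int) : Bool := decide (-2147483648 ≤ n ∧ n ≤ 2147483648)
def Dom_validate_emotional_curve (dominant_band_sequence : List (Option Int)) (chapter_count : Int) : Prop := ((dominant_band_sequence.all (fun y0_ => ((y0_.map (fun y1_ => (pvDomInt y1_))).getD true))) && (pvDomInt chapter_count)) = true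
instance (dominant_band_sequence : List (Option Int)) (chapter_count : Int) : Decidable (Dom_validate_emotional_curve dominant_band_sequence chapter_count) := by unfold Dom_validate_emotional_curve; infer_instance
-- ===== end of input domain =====

-- B replaces A's incremental run-counter loop (Rule 2) by a run-length encoding of the
-- sequence followed by a max over the lengths of non-None runs (objective: alternative).

-- ===== PORT A =====
def validate_emotional_curve (dominant_band_sequence : List (Option Int)) (chapter_count : Int) : List String :=
  let errors : List String := []
  if chapter_count < 6 then errors else
  let bands_in_sequence : List Int := dominant_band_sequence.filterMap (fun b => b)
  let distinct_bands := PySem.Set.ofList bands_in_sequence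
  let errors :=
    if (distinct_bands.length : Int) < 3 then
      errors ++ ["Emotional curve invalid: only " ++ PySem.Int.toStr (distinct_bands.length : Int) ++
        " distinct BAND values found (minimum 3 required for books >= 6 chapters)."]
    else errors
  let st : Int × Int :=
    (PySem.List.pyRange 1 (dominant_band_sequence.length : Int) 1).foldl
      (fun (st : Int × Int) i =>
        let curr := PySem.List.pyGetD dominant_band_sequence i none
        let prev := PySem.List.pyGetD dominant_band_sequence (i - 1) none
        if curr ≠ none ∧ prev ≠ none ∧ curr = prev then
          (max st.1 (st.2 + 1), st.2 + 1)
        else (st.1, 1))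
      (1, 1)
  let max_run := st.1
  let errors :=
    if max_run > 3 then
      errors ++ ["Emotional curve invalid: " ++ PySem.Int.toStr max_run ++
        " consecutive chapters with same BAND detected (maximum allowed is 3)."]
    else errors
  errors

-- ===== PORT B =====
-- _runs: maximal runs of equal adjacent elements, as (value, length) pairs; the inner
-- 'while j < n and seq[j] == seq[i]' scan is the span over the tail.
def pvRuns : List (Option Int) → List (Option Int × Int)
  | [] => []
  | x :: xs =>
    let s := xs.span (fun y => y == x)
    (x, 1 + (s.1.length : Int)) :: pvRuns s.2
termination_by xs => xs.length
decreasing_by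
  simp only [List.span_eq_takeWhile_dropWhile]
  exact Nat.lt_succ_of_le (List.length_dropWhile_le _ _)

def validate_emotional_curve_alt (dominant_band_sequence : List (Option Int)) (chapter_count : Int) : List String :=
  let errors : List String := []
  if chapter_count < 6 then errors else
  let distinct_bands := PySem.Set.ofList (dominant_band_sequence.filterMap (fun b => b))
  let errors :=
    if (distinct_bands.length : Int) < 3 then
      errors ++ ["Emotional curve invalid: only " ++ PySem.Int.toStr (distinct_bands.length : Int) ++
        " distinct BAND values found (minimum 3 required for books >= 6 chapters)."]
    else errors
  let run_lengths : List Int :=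
    ((pvRuns dominant_band_sequence).filter (fun p => p.1 ≠ none)).map (fun p => p.2)
  let max_run := (PySem.List.max? run_lengths (fun y => y)).getD 1
  let errors :=
    if max_run > 3 then
      errors ++ ["Emotional curve invalid: " ++ PySem.Int.toStr max_run ++
        " consecutive chapters with same BAND detected (maximum allowed is 3)."]
    else errors
  errors

-- ===== PRECONDITION & SPEC =====
def Spec_validate_emotional_curve (dominant_band_sequence : List (Option Int)) (chapter_count : Int) (out : List String) : Prop := out = validate_emotional_curve_alt dominant_band_sequence chapter_count
instance (dominant_band_sequence : List (Option Int)) (chapter_count : Int) (out : List String) : Decidable (Spec_validate_emotional_curve dominant_band_sequence chapter_count out) := by unfold Spec_validate_emotional_curve; infer_instance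

-- ===== CLAIM (what is proved, stated in full; the proofs are below) =====
def Claim_equal_validate_emotional_curve : Prop := ∀ (dominant_band_sequence : List (Option Int)) (chapter_count : Int), Dom_validate_emotional_curve dominant_band_sequence chapter_count → Spec_validate_emotional_curve dominant_band_sequence chapter_count (validate_emotional_curve dominant_band_sequence chapter_count)

-- ===== LEMMAS AND PROOFS =====

-- A's loop body, on a (prev, curr) pair of adjacent elements.
def pvStepA (st : Int × Int) (p : Option Int × Option Int) : Int × Int :=
  if p.2 ≠ none ∧ p.1 ≠ none ∧ p.2 = p.1 then (max st.1 (st.2 + 1), st.2 + 1) else (st.1, 1)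

-- A's loop, recursively: prev element, (max_run, current_run) state.
def pvGoA : Option Int → Int → Int → List (Option Int) → Int
  | _, m, _, [] => m
  | prev, m, c, y :: ys =>
    if y ≠ none ∧ prev ≠ none ∧ y = prev then pvGoA y (max m (c + 1)) (c + 1) ys
    else pvGoA y m 1 ys

-- max-run of the remaining list, current run of length c ending in prev.
def pvMRun : Option Int → Int → List (Option Int) → Int
  | _, c, [] => c
  | prev, c, y :: ys =>
    if y ≠ none ∧ prev ≠ none ∧ y = prev then pvMRun y (c + 1) ys
    else max c (pvMRun y 1 ys)

-- grouping with an open run (prev, c), consuming one element at a time.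
def pvGo : Option Int → Int → List (Option Int) → List (Option Int × Int)
  | x, c, [] => [(x, c)]
  | x, c, y :: ys => if y = x then pvGo x (c + 1) ys else (x, c) :: pvGo y 1 ys

-- max of the lengths of non-None runs, with floor 1.
def pvM (gs : List (Option Int × Int)) : Int :=
  gs.foldr (fun p acc => if p.1 ≠ none then max p.2 acc else acc) 1

theorem pvMap_pyRange_eq_zip (xs : List (Option Int)) :
    (PySem.List.pyRange 1 (xs.length : Int) 1).map
      (fun i => (PySem.List.pyGetD xs (i - 1) none, PySem.List.pyGetD xs i none))
      = xs.zip (xs.drop 1) := by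
  apply List.ext_getElem
  · simp only [List.length_map, PySem.List.length_pyRange_one, List.length_zip,
      List.length_drop]
    omega
  · intro k h1 h2
    have hk : k < xs.length - 1 := by
      simp [PySem.List.length_pyRange_one] at h1; omega
    have h1' : PySem.List.pyGetD xs ((1 : Int) + k - 1) none = xs[k] := by
      rw [show (1 : Int) + k - 1 = ((k : Nat) : Int) by omega]
      rw [PySem.List.pyGetD_eq_getElem xs none (by omega) (by simp; omega)]
      simp
    have h2' : PySem.List.pyGetD xs ((1 : Int) + k) none = xs[k + 1] := by
      rw [show (1 : Int) + k = ((k + 1 : Nat) : Int) by omega]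
      rw [PySem.List.pyGetD_eq_getElem xs none (by omega) (by simp; omega)]
      simp
    simp only [List.getElem_map, PySem.List.getElem_pyRange_one, List.getElem_zip, h1', h2']
    refine Prod.ext rfl ?_
    simp only [List.getElem_drop]
    congr 1
    omega

theorem pvZipFold_eq_goA (ys : List (Option Int)) :
    ∀ (prev : Option Int) (m c : Int),
    (((prev :: ys).zip ys).foldl pvStepA (m, c)).1 = pvGoA prev m c ys := by
  induction ys with
  | nil => intro prev m c; simp [pvGoA]
  | cons y ys ih =>
    intro prev m c
    simp only [List.zip_cons_cons, List.foldl_cons, pvGoA, pvStepA]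
    by_cases h : y ≠ none ∧ prev ≠ none ∧ y = prev
    · simp only [if_pos h]; exact ih y (max m (c + 1)) (c + 1)
    · simp only [if_neg h]; exact ih y m 1

theorem pvMRun_ge (ys : List (Option Int)) :
    ∀ (prev : Option Int) (c : Int), c ≤ pvMRun prev c ys := by
  induction ys with
  | nil => intro prev c; simp [pvMRun]
  | cons y ys ih =>
    intro prev c
    simp only [pvMRun]
    split
    · have := ih y (c + 1); omega
    · have := ih y 1; omega

theorem pvGoA_eq_mrun (ys : List (Option Int)) :
    ∀ (prev : Option Int) (m c : Int), 1 ≤ c → c ≤ m →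
    pvGoA prev m c ys = max m (pvMRun prev c ys) := by
  induction ys with
  | nil => intro prev m c h1 h2; simp only [pvGoA, pvMRun]; omega
  | cons y ys ih =>
    intro prev m c h1 h2
    simp only [pvGoA, pvMRun]
    split
    · rw [ih y (max m (c + 1)) (c + 1) (by omega) (by omega)]
      have := pvMRun_ge ys y (c + 1); omega
    · rw [ih y m 1 (by omega) (by omega)]
      have := pvMRun_ge ys y 1; omega

theorem pvM_go_none (ys : List (Option Int)) :
    ∀ (c c' : Int), pvM (pvGo none c ys) = pvM (pvGo none c' ys) := by
  induction ys with
  | nil => intro c c'; simp [pvGo, pvM]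
  | cons y ys ih =>
    intro c c'
    simp only [pvGo]
    by_cases h : y = none
    · simp only [if_pos h]; subst h; exact ih (c + 1) (c' + 1)
    · simp only [if_neg h, pvM, List.foldr_cons]
      simp

theorem pvMRun_eq_M (ys : List (Option Int)) :
    ∀ (prev : Option Int) (c : Int), 1 ≤ c → (prev = none → c = 1) →
    max 1 (pvMRun prev c ys) = pvM (pvGo prev c ys) := by
  induction ys with
  | nil =>
    intro prev c h1 h2
    simp only [pvMRun, pvGo, pvM, List.foldr_cons, List.foldr_nil]
    by_cases h : prev = none
    · simp [h, h2 h]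
    · simp [h]; omega
  | cons y ys ih =>
    intro prev c h1 h2
    simp only [pvMRun, pvGo]
    by_cases hy : y = prev
    · by_cases hp : prev = none
      · -- extending a None run: the run is grouped but filtered out later
        have hcond : ¬ (y ≠ none ∧ prev ≠ none ∧ y = prev) := by
          intro h; exact h.2.1 hp
        simp only [if_neg hcond, if_pos hy]
        have hc1 : c = 1 := h2 hp
        subst hc1; subst hy; subst hp
        have : max (1:Int) (max 1 (pvMRun none 1 ys)) = max 1 (pvMRun none 1 ys) := by omega
        rw [show max (1:Int) (max 1 (pvMRun none 1 ys)) = max 1 (pvMRun none 1 ys) by omega]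
        rw [ih none 1 (by omega) (fun _ => rfl)]
        exact pvM_go_none ys 1 2
      · have hcond : (y ≠ none ∧ prev ≠ none ∧ y = prev) := by
          refine ⟨?_, hp, hy⟩; rw [hy]; exact hp
        simp only [if_pos hcond, if_pos hy]
        rw [ih y (c + 1) (by omega) (by intro h; exact absurd (hy ▸ h) hp)]
        subst hy; rfl
    · have hcond : ¬ (y ≠ none ∧ prev ≠ none ∧ y = prev) := by
        intro h; exact hy h.2.2
      simp only [if_neg hcond, if_neg hy, pvM, List.foldr_cons]
      by_cases hp : prev = none
      · have hc1 : c = 1 := h2 hp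
        subst hc1
        simp only [if_neg (by simp [hp] : ¬ prev ≠ none)]
        rw [show max (1:Int) (max 1 (pvMRun y 1 ys)) = max 1 (pvMRun y 1 ys) by omega]
        exact ih y 1 (by omega) (fun _ => rfl)
      · simp only [if_pos hp]
        rw [show max (1:Int) (max c (pvMRun y 1 ys)) = max c (max 1 (pvMRun y 1 ys)) by
          have := pvMRun_ge ys y 1; omega]
        rw [ih y 1 (by omega) (fun _ => rfl)]
        rfl

theorem pvRuns_eq_go (ys : List (Option Int)) :
    ∀ (x : Option Int) (c : Int),
    (x, c + ((ys.takeWhile (fun y => y == x)).length : Int)) ::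
      pvRuns (ys.dropWhile (fun y => y == x)) = pvGo x c ys := by
  induction ys with
  | nil => intro x c; simp [pvGo, pvRuns]
  | cons y ys ih =>
    intro x c
    by_cases h : y = x
    · have hb : (y == x) = true := by simp [h]
      simp only [List.takeWhile_cons, List.dropWhile_cons, hb, if_pos, List.length_cons,
        pvGo, if_pos h]
      rw [← ih x (c + 1)]
      congr 1
      simp; omega
    · have hb : (y == x) = false := by simp [h]
      simp only [List.takeWhile_cons, List.dropWhile_cons, hb, List.length_nil, pvGo,
        if_neg h, Bool.false_eq_true, if_false]
      rw [← ih y 1]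
      rw [pvRuns]
      simp only [List.span_eq_takeWhile_dropWhile]
      norm_num

theorem pvGo_counts_ge (ys : List (Option Int)) :
    ∀ (x : Option Int) (c : Int), 1 ≤ c → ∀ p ∈ pvGo x c ys, 1 ≤ p.2 := by
  induction ys with
  | nil =>
    intro x c hc p hp; simp [pvGo] at hp; subst hp; exact hc
  | cons y ys ih =>
    intro x c hc p hp
    simp only [pvGo] at hp
    split at hp
    · exact ih _ _ (by omega) p hp
    · rcases List.mem_cons.mp hp with h | h
      · subst h; exact hc
      · exact ih _ _ (by omega) p h

theorem pvFoldl_max_ge (t : List Int) : ∀ (x : Int), 1 ≤ x → t.foldl max x = max x (t.foldr max 1) := by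
  induction t with
  | nil => intro x hx; simp; omega
  | cons y t ih =>
    intro x hx
    simp only [List.foldl_cons, List.foldr_cons]
    rw [ih (max x y) (by omega)]
    omega

theorem pvMaxD_eq_foldr (ls : List Int) (h : ∀ n ∈ ls, 1 ≤ n) :
    (PySem.List.max? ls (fun y => y)).getD 1 = ls.foldr max 1 := by
  cases ls with
  | nil => simp [PySem.List.max?]
  | cons x t =>
    rw [PySem.List.max?_id_cons]
    simp only [Option.getD_some]
    exact pvFoldl_max_ge t x (h x (by simp))

theorem pvM_eq_foldr_filter (gs : List (Option Int × Int)) :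
    pvM gs = ((gs.filter (fun p => p.1 ≠ none)).map (fun p => p.2)).foldr max 1 := by
  induction gs with
  | nil => rfl
  | cons p gs ih =>
    simp only [pvM, List.foldr_cons, List.filter_cons]
    by_cases h : p.1 ≠ none
    · have hd : (decide (p.1 ≠ none)) = true := by simpa using h
      rw [if_pos h, show (List.foldr (fun p acc => if p.1 ≠ none then max p.2 acc else acc) 1 gs) = pvM gs from rfl, ih]
      simp [hd]
    · have : (decide ¬p.1 = none) = false := by simp at h ⊢; exact h
      simp only [if_neg h, this, Bool.false_eq_true, if_false]
      exact ih

-- the heart: A's loop value equals B's max-of-run-lengths value.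
theorem pvMaxRun_eq (xs : List (Option Int)) :
    ((PySem.List.pyRange 1 (xs.length : Int) 1).foldl
      (fun (st : Int × Int) i =>
        let curr := PySem.List.pyGetD xs i none
        let prev := PySem.List.pyGetD xs (i - 1) none
        if curr ≠ none ∧ prev ≠ none ∧ curr = prev then
          (max st.1 (st.2 + 1), st.2 + 1)
        else (st.1, 1))
      (1, 1)).1
    = (PySem.List.max? (((pvRuns xs).filter (fun p => p.1 ≠ none)).map (fun p => p.2))
        (fun y => y)).getD 1 := by
  have hfold :
      (PySem.List.pyRange 1 (xs.length : Int) 1).foldl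
        (fun (st : Int × Int) i =>
          let curr := PySem.List.pyGetD xs i none
          let prev := PySem.List.pyGetD xs (i - 1) none
          if curr ≠ none ∧ prev ≠ none ∧ curr = prev then
            (max st.1 (st.2 + 1), st.2 + 1)
          else (st.1, 1))
        (1, 1)
      = (xs.zip (xs.drop 1)).foldl pvStepA (1, 1) := by
    rw [← pvMap_pyRange_eq_zip xs, List.foldl_map]
    rfl
  rw [hfold]
  rw [pvMaxD_eq_foldr _ ?hge]
  case hge =>
    intro n hn
    simp only [List.mem_map, List.mem_filter] at hn
    obtain ⟨p, ⟨hp, _⟩, hn⟩ := hn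
    cases xs with
    | nil => simp [pvRuns] at hp
    | cons x ys =>
      rw [pvRuns] at hp
      simp only [List.span_eq_takeWhile_dropWhile] at hp
      rw [show ((x, 1 + ((ys.takeWhile (fun y => y == x)).length : Int)) :
            Option Int × Int)
          = (x, (1:Int) + ((ys.takeWhile (fun y => y == x)).length : Int)) from rfl] at hp
      have hp' : p ∈ pvGo x 1 ys := by
        rw [← pvRuns_eq_go ys x 1]
        simpa using hp
      subst hn
      exact pvGo_counts_ge ys x 1 (by omega) p hp'
  rw [← pvM_eq_foldr_filter]
  cases xs with
  | nil => simp [pvRuns, pvM]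
  | cons x ys =>
    rw [show List.drop 1 (x :: ys) = ys from rfl]
    rw [pvZipFold_eq_goA ys x 1 1]
    rw [pvGoA_eq_mrun ys x 1 1 (by omega) (by omega)]
    have : pvRuns (x :: ys) = pvGo x 1 ys := by
      rw [pvRuns]
      simp only [List.span_eq_takeWhile_dropWhile]
      rw [← pvRuns_eq_go ys x 1]
    rw [this]
    exact pvMRun_eq_M ys x 1 (by omega) (fun _ => rfl)

-- ===== VERDICT (by name: the statement is the Claim_ definition above) =====
theorem validate_emotional_curve_spec : Claim_equal_validate_emotional_curve := by
  intro xs cc _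
  unfold Spec_validate_emotional_curve validate_emotional_curve validate_emotional_curve_alt
  by_cases h : cc < 6
  · simp [h]
  · simp only [if_neg h]
    rw [pvMaxRun_eq xs]
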